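-- pv_equiv track=rewrite | github.com/soarlab/fpsyn | FPSynLib.py | adjust_coeff_dic
-- ===== SOURCE A (Python) =====
-- def adjust_coeff_dic(s, thrhld):
--     dic={}
--     while len(s)>0:
--         m=max(s)
--         s1=[]
--         for e in s:
--             if m-e<=thrhld:
--                 dic[e]=m
--                 s1.append(e)
--         for u in s1:
--             s.remove(u)
--     return dic
-- ===== SOURCE B (Python) =====
-- def adjust_coeff_dic(s, thrhld):
--     # Return-value equivalence only: A empties the caller's list s in place; B leaves it untouched.
--     distinct = list(dict.fromkeys(s))
--     group = {}
--     cur = None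
--     for v in sorted(distinct, reverse=True):
--         if cur is None or cur - v > thrhld:
--             cur = v
--         group[v] = cur
--     buckets = {}
--     for e in distinct:
--         buckets.setdefault(group[e], []).append(e)
--     dic = {}
--     for g in sorted(buckets, reverse=True):
--         for e in buckets[g]:
--             dic[e] = g
--     return dic
-- ===== Notes on version B (the rewrite author's own statement) =====
-- stated objective: faster
-- what changed: Replaces the repeated max-scan/filter/remove rounds over a mutated list by one dedup, one descending sort with a single greedy sweep assigning each value its group max, then bucketed emission in descending group order; A's list is no longer mutated (return value is identical).
import Mathlib
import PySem

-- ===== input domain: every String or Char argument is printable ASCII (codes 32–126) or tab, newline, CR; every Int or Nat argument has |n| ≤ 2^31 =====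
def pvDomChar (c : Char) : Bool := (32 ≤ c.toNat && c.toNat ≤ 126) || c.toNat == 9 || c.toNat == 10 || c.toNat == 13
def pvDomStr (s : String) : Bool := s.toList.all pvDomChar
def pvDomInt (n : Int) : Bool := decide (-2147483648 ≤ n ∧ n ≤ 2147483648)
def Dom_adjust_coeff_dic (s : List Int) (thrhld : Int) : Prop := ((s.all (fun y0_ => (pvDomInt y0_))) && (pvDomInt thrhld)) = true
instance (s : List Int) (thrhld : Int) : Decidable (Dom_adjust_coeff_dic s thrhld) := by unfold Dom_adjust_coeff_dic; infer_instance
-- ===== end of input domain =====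

-- B replaces A's quadratic max/filter/remove rounds by dedup + one descending sort + a greedy sweep (measured asymptotically faster); return-value equivalence only: the Python A empties its list argument in place, B does not mutate it.


-- ===== PORT A =====
-- the while loop: s is the mutated list, dic the dict built so far.  The inner `if h : …`
-- guard only ensures termination: Python loops forever when no element is removed
-- (nonempty s with thrhld < 0) — those inputs are excluded by Pre_ below.
def adjA_loop (thrhld : Int) (dic : PySem.Dict Int Int) (s : List Int) : PySem.Dict Int Int :=
  if s.length > 0 then
    let m := ((PySem.List.max? s (fun x => x)).getD 0)          -- m = max(s); s ≠ [] here
    let p := s.foldl (fun (st : PySem.Dict Int Int × List Int) e =>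
        if m - e ≤ thrhld then (st.1.insert e m, st.2 ++ [e]) else st) (dic, ([] : List Int))
    let s' := p.2.foldl (fun acc u => (PySem.List.remove? acc u).getD acc) s
    if h : s'.length < s.length then adjA_loop thrhld p.1 s' else p.1
  else dic
termination_by s.length
decreasing_by exact h

def adjust_coeff_dic (s : List Int) (thrhld : Int) : List (Int × Int) :=
  (adjA_loop thrhld PySem.Dict.empty s).items

-- ===== PORT B =====
def adjust_coeff_dic_alt (s : List Int) (thrhld : Int) : List (Int × Int) :=
  let distinct := PySem.List.dedup s                             -- list(dict.fromkeys(s))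
  let gc := (PySem.List.sorted distinct (fun v => v) true).foldl -- the greedy sweep: cur is None or some
      (fun (st : PySem.Dict Int Int × Option Int) v =>
        let cur : Int := match st.2 with
          | none => v
          | some c => if c - v > thrhld then v else c
        (st.1.insert v cur, some cur)) (PySem.Dict.empty, none)
  let group := gc.1
  let buckets := distinct.foldl                                  -- buckets.setdefault(group[e], []).append(e)
      (fun (b : PySem.Dict Int (List Int)) e =>
        b.modify (group.getD e 0) [] (fun l => l ++ [e])) PySem.Dict.empty
      -- group[e]: e ∈ distinct is always a key of group, so the KeyError default 0 is never used
  let dic := (PySem.List.sorted buckets.keys (fun g => g) true).foldl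
      (fun (dic : PySem.Dict Int Int) g =>
        (buckets.getD g []).foldl (fun dic e => dic.insert e g) dic) PySem.Dict.empty
  dic.items

-- ===== PRECONDITION & SPEC =====
-- Pre_ excludes exactly the inputs where the Python A never returns: on a nonempty s with
-- thrhld < 0 no element satisfies m - e <= thrhld, nothing is removed, and the while loop runs forever.
def Pre_adjust_coeff_dic (s : List Int) (thrhld : Int) : Prop := s = [] ∨ 0 ≤ thrhld
instance (s : List Int) (thrhld : Int) : Decidable (Pre_adjust_coeff_dic s thrhld) := by unfold Pre_adjust_coeff_dic; infer_instance
def pvWitness_adjust_coeff_dic : List Int × Int := ([7, 1, 6, 3, 7, -2], 2)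

def Spec_adjust_coeff_dic (s : List Int) (thrhld : Int) (out : List (Int × Int)) : Prop := out = adjust_coeff_dic_alt s thrhld
instance (s : List Int) (thrhld : Int) (out : List (Int × Int)) : Decidable (Spec_adjust_coeff_dic s thrhld out) := by unfold Spec_adjust_coeff_dic; infer_instance

-- ===== CLAIM (what is proved, stated in full; the proofs are below) =====
def Claim_equal_adjust_coeff_dic : Prop := ∀ (s : List Int) (thrhld : Int), Dom_adjust_coeff_dic s thrhld → Pre_adjust_coeff_dic s thrhld → Spec_adjust_coeff_dic s thrhld (adjust_coeff_dic s thrhld)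

-- ===== LEMMAS AND PROOFS =====


theorem mem_update (s l : List Int) (x : Int) : x ∈ PySem.Set.update s l ↔ x ∈ s ∨ x ∈ l := by
  induction l generalizing s with
  | nil => simp [PySem.Set.update]
  | cons a t ih =>
    have hstep : PySem.Set.update s (a :: t) = PySem.Set.update (PySem.Set.add s a) t := rfl
    have hadd : x ∈ PySem.Set.add s a ↔ x ∈ s ∨ x = a := by
      rw [PySem.Set.add]
      split
      · rename_i hin
        have ha : a ∈ s := by simpa [PySem.Set.contains] using hin
        constructor
        · intro hy; exact Or.inl hy
        · rintro (hy | rfl)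
          · exact hy
          · exact ha
      · simp
    rw [hstep, ih, hadd]
    simp [List.mem_cons]
    tauto

-- proof-side vocabulary: the round structure of the clustering
def pvP (m thrhld e : Int) : Bool := decide (m - e ≤ thrhld)
def pvM (d : List Int) : Int := (PySem.List.max? d (fun x => x)).getD 0
def pvRest (thrhld : Int) (d : List Int) : List Int := d.filter (fun e => !pvP (pvM d) thrhld e)

theorem pvM_isMax (d : List Int) : ∀ y ∈ d, y ≤ pvM d := by
  intro y hy
  cases h : PySem.List.max? d (fun x => x) with
  | none => rw [PySem.List.max?_eq_none_iff] at h; subst h; cases hy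
  | some m => have := PySem.List.max?_isMax h y hy; simpa [pvM, h] using this

theorem pvM_mem (d : List Int) (hd : d ≠ []) : pvM d ∈ d := by
  cases h : PySem.List.max? d (fun x => x) with
  | none => rw [PySem.List.max?_eq_none_iff] at h; exact absurd h hd
  | some m => have := PySem.List.max?_mem h; simpa [pvM, h] using this

theorem pvM_eq (d : List Int) (m : Int) (hm : m ∈ d) (h : ∀ y ∈ d, y ≤ m) : pvM d = m := by
  have h1 : pvM d ≤ m := h _ (pvM_mem d (by rintro rfl; cases hm))
  have h2 : m ≤ pvM d := pvM_isMax d m hm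
  omega

theorem rest_lt (thrhld : Int) (d : List Int) (h0 : 0 ≤ thrhld) (hd : d ≠ []) :
    (pvRest thrhld d).length < d.length := by
  have hm : pvM d ∈ d := pvM_mem d hd
  rw [pvRest, List.length_filter_lt_length_iff_exists]
  exact ⟨pvM d, hm, by simp [pvP]; omega⟩

def roundRec (thrhld : Int) (d : List Int) : List (Int × Int) :=
  if d = [] then [] else
    let here := (d.filter (pvP (pvM d) thrhld)).map (fun e => (e, pvM d))
    if _h : (pvRest thrhld d).length < d.length then here ++ roundRec thrhld (pvRest thrhld d) else here
termination_by d.length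

def rho (thrhld : Int) (d : List Int) (v : Int) : Int :=
  if d = [] then v else
    if pvP (pvM d) thrhld v then pvM d
    else if _h : (pvRest thrhld d).length < d.length then rho thrhld (pvRest thrhld d) v else v
termination_by d.length

def rmaxes (thrhld : Int) (d : List Int) : List Int :=
  if d = [] then [] else
    pvM d :: (if _h : (pvRest thrhld d).length < d.length then rmaxes thrhld (pvRest thrhld d) else [])
termination_by d.length

theorem roundRec_eq (thrhld : Int) (d : List Int) (h0 : 0 ≤ thrhld) (hd : d ≠ []) :
    roundRec thrhld d
      = (d.filter (pvP (pvM d) thrhld)).map (fun e => (e, pvM d)) ++ roundRec thrhld (pvRest thrhld d) := by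
  rw [roundRec]; simp [hd, dif_pos (rest_lt thrhld d h0 hd)]

theorem rho_here (thrhld : Int) (d : List Int) (v : Int) (hd : d ≠ [])
    (hp : pvP (pvM d) thrhld v = true) : rho thrhld d v = pvM d := by
  rw [rho]; simp [hd, hp]

theorem rho_rest (thrhld : Int) (d : List Int) (v : Int) (h0 : 0 ≤ thrhld) (hd : d ≠ [])
    (hp : pvP (pvM d) thrhld v = false) : rho thrhld d v = rho thrhld (pvRest thrhld d) v := by
  rw [rho]; simp [hd, hp, dif_pos (rest_lt thrhld d h0 hd)]

theorem mem_pvRest_iff (thrhld : Int) (d : List Int) (e : Int) :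
    e ∈ pvRest thrhld d ↔ e ∈ d ∧ pvP (pvM d) thrhld e = false := by
  simp [pvRest, List.mem_filter]

theorem rho_mem (thrhld : Int) (h0 : 0 ≤ thrhld) :
    ∀ (n : Nat) (d : List Int) (v : Int), d.length ≤ n → v ∈ d → rho thrhld d v ∈ d := by
  intro n
  induction n with
  | zero =>
    intro d v hn hv
    cases d with
    | nil => cases hv
    | cons a t => simp at hn
  | succ n ih =>
    intro d v hn hv
    have hd : d ≠ [] := by rintro rfl; cases hv
    by_cases hp : pvP (pvM d) thrhld v = true
    · rw [rho_here thrhld d v hd hp]; exact pvM_mem d hd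
    · rw [rho_rest thrhld d v h0 hd (by simpa using hp)]
      have hv2 : v ∈ pvRest thrhld d :=
        (mem_pvRest_iff thrhld d v).2 ⟨hv, by simpa using hp⟩
      have hlt := rest_lt thrhld d h0 hd
      have := ih (pvRest thrhld d) v (by omega) hv2
      exact ((mem_pvRest_iff thrhld d _).1 this).1

theorem mem_rmaxes (thrhld : Int) (h0 : 0 ≤ thrhld) :
    ∀ (n : Nat) (d : List Int), d.length ≤ n → ∀ g,
      (g ∈ rmaxes thrhld d ↔ ∃ e ∈ d, rho thrhld d e = g) := by
  intro n
  induction n with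
  | zero =>
    intro d hn g
    cases d with
    | nil => rw [rmaxes]; simp
    | cons a t => simp at hn
  | succ n ih =>
    intro d hn g
    by_cases hd : d = []
    · subst hd; rw [rmaxes]; simp
    have hlt := rest_lt thrhld d h0 hd
    rw [rmaxes]; simp only [hd, if_false, dif_pos hlt]
    constructor
    · intro hg
      rcases List.mem_cons.1 hg with rfl | hg
      · exact ⟨pvM d, pvM_mem d hd, rho_here thrhld d _ hd (by simp [pvP]; omega)⟩
      · rcases (ih (pvRest thrhld d) (by omega) g).1 hg with ⟨e, he, hrho⟩
        rcases (mem_pvRest_iff thrhld d e).1 he with ⟨hed, hpf⟩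
        exact ⟨e, hed, by rw [rho_rest thrhld d e h0 hd hpf]; exact hrho⟩
    · rintro ⟨e, he, hrho⟩
      by_cases hp : pvP (pvM d) thrhld e = true
      · rw [rho_here thrhld d e hd hp] at hrho
        exact List.mem_cons.2 (Or.inl hrho.symm)
      · refine List.mem_cons.2 (Or.inr ?_)
        rw [rho_rest thrhld d e h0 hd (by simpa using hp)] at hrho
        exact (ih (pvRest thrhld d) (by omega) g).2
          ⟨e, (mem_pvRest_iff thrhld d e).2 ⟨he, by simpa using hp⟩, hrho⟩

theorem rmaxes_rest_lt (thrhld : Int) (h0 : 0 ≤ thrhld) (d : List Int) (_hd : d ≠ []) :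
    ∀ g ∈ rmaxes thrhld (pvRest thrhld d), g < pvM d := by
  intro g hg
  rcases (mem_rmaxes thrhld h0 (pvRest thrhld d).length _ le_rfl g).1 hg with ⟨e, he, hrho⟩
  have hgm : g ∈ pvRest thrhld d := hrho ▸ rho_mem thrhld h0 (pvRest thrhld d).length _ e le_rfl he
  rcases (mem_pvRest_iff thrhld d g).1 hgm with ⟨_, hpf⟩
  simp [pvP] at hpf; omega

theorem rmaxes_gt (thrhld : Int) (h0 : 0 ≤ thrhld) :
    ∀ (n : Nat) (d : List Int), d.length ≤ n → (rmaxes thrhld d).Pairwise (· > ·) := by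
  intro n
  induction n with
  | zero =>
    intro d hn
    cases d with
    | nil => rw [rmaxes]; simp
    | cons a t => simp at hn
  | succ n ih =>
    intro d hn
    by_cases hd : d = []
    · subst hd; rw [rmaxes]; simp
    have hlt := rest_lt thrhld d h0 hd
    rw [rmaxes]; simp only [hd, if_false, dif_pos hlt]
    exact List.pairwise_cons.2 ⟨fun g hg => rmaxes_rest_lt thrhld h0 d hd g hg,
      ih (pvRest thrhld d) (by omega)⟩

-- ---------- A-side: the removal loop is a filter ----------

theorem rem_cons (x u : Int) (t : List Int) (h : u ≠ x) :
    (PySem.List.remove? (x :: t) u).getD (x :: t) = x :: (PySem.List.remove? t u).getD t := by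
  rw [PySem.List.remove?_cons_of_ne t (Ne.symm h)]
  cases PySem.List.remove? t u <;> simp

theorem rem_comm : ∀ (l : List Int) (x : Int) (t : List Int), (∀ u ∈ l, u ≠ x) →
    l.foldl (fun acc u => (PySem.List.remove? acc u).getD acc) (x :: t)
      = x :: l.foldl (fun acc u => (PySem.List.remove? acc u).getD acc) t := by
  intro l
  induction l with
  | nil => intro x t _; rfl
  | cons u l ih =>
    intro x t h
    simp only [List.foldl_cons]
    rw [rem_cons x u t (h u (by simp))]
    exact ih x _ (fun v hv => h v (by simp [hv]))

theorem remove_filter (p : Int → Bool) : ∀ (s : List Int),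
    (s.filter p).foldl (fun acc u => (PySem.List.remove? acc u).getD acc) s
      = s.filter (fun e => !p e) := by
  intro s
  induction s with
  | nil => rfl
  | cons x t ih =>
    by_cases hp : p x = true
    · rw [List.filter_cons_of_pos hp]
      simp only [List.foldl_cons, PySem.List.remove?_cons_self, Option.getD_some]
      rw [ih, List.filter_cons_of_neg (by simp [hp])]
    · have hp' : p x = false := by simpa using hp
      rw [List.filter_cons_of_neg (by simp [hp'])]
      rw [rem_comm (t.filter p) x t (fun u hu => by
        rintro rfl; rw [(List.mem_filter.1 hu).2] at hp'; cases hp')]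
      rw [ih, List.filter_cons_of_pos (by simp [hp'])]

-- ---------- A-side: constant-value insert loops ----------

theorem get?_foldl_insert_const (m : Int) : ∀ (l : List Int) (d : PySem.Dict Int Int) (k : Int),
    (l.foldl (fun d e => d.insert e m) d).get? k = if k ∈ l then some m else d.get? k := by
  intro l
  induction l with
  | nil => intro d k; simp
  | cons e t ih =>
    intro d k
    simp only [List.foldl_cons]
    rw [ih]
    by_cases ht : k ∈ t
    · simp [ht]
    · by_cases he : k = e
      · subst he; simp [ht, PySem.Dict.get?_insert_self]
      · have hne : (d.insert e m).get? k = d.get? k := PySem.Dict.get?_insert_of_ne d m he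
        simp [ht, he, hne]

theorem insert_eq_self (d : PySem.Dict Int Int) (k v : Int) (hnd : d.keys.Nodup)
    (h : d.get? k = some v) : d.insert k v = d := by
  have hc : d.contains k = true := by
    rw [PySem.Dict.contains_eq_isSome_get?, h]; rfl
  apply PySem.Dict.ext
  rw [PySem.Dict.items_insert_of_contains d v hc]
  have hid : ∀ p ∈ d.items, (if (p.1 == k) = true then (k, v) else p) = p := by
    intro p hp
    by_cases hpk : p.1 = k
    · rcases p with ⟨a, b⟩
      simp only at hpk
      subst hpk
      have hgp : d.get? a = some b := PySem.Dict.get?_of_mem_items d (by simpa using hp) hnd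
      rw [h] at hgp
      have hb : b = v := (Option.some.inj hgp).symm
      subst hb
      simp
    · simp [hpk]
  calc List.map (fun p => if (p.1 == k) = true then (k, v) else p) d.items
      = List.map id d.items := List.map_congr_left (fun a ha => by rw [hid a ha]; rfl)
    _ = d.items := List.map_id d.items

theorem dedup_append_single (l : List Int) (x : Int) :
    PySem.List.dedup (l ++ [x]) = if x ∈ l then PySem.List.dedup l else PySem.List.dedup l ++ [x] := by
  have h1 : PySem.List.dedup (l ++ [x]) = PySem.Set.add (PySem.List.dedup l) x := by
    simp [PySem.List.dedup_eq_ofList, PySem.Set.ofList_eq_foldl]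
  rw [h1, PySem.Set.add]
  split <;> rename_i h <;> split <;> rename_i h2 <;> simp_all [PySem.Set.contains]

theorem foldl_insert_dedup (m : Int) : ∀ (l : List Int) (d : PySem.Dict Int Int), d.keys.Nodup →
    l.foldl (fun d e => d.insert e m) d = (PySem.List.dedup l).foldl (fun d e => d.insert e m) d := by
  intro l
  induction l using List.reverseRecOn with
  | nil => intro d _; rfl
  | append_singleton l x ih =>
    intro d hnd
    rw [List.foldl_append, dedup_append_single]
    by_cases hx : x ∈ l
    · rw [if_pos hx, ← ih d hnd]
      simp only [List.foldl_cons, List.foldl_nil]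
      apply insert_eq_self
      · have := PySem.Dict.nodup_keys_foldl_insert l (fun _ _ => m) d hnd
        simpa using this
      · rw [get?_foldl_insert_const m l d x, if_pos hx]
    · rw [if_neg hx, List.foldl_append, ← ih d hnd]

theorem contains_false_of_not_mem (d : PySem.Dict Int Int) (k : Int) (h : k ∉ d.keys) :
    d.contains k = false := by
  cases hc : d.contains k
  · rfl
  · exact absurd ((PySem.Dict.contains_iff_mem_keys d k).1 hc) h

theorem dedup_filter (p : Int → Bool) : ∀ (l : List Int),
    PySem.List.dedup (l.filter p) = (PySem.List.dedup l).filter p := by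
  intro l
  induction l using List.reverseRecOn with
  | nil => rfl
  | append_singleton l x ih =>
    rw [List.filter_append, dedup_append_single]
    by_cases hp : p x = true
    · have hfx : List.filter p [x] = [x] := by simp [hp]
      rw [hfx, dedup_append_single, ih]
      by_cases hx : x ∈ l
      · rw [if_pos hx, if_pos (List.mem_filter.2 ⟨hx, hp⟩)]
      · rw [if_neg hx, if_neg (fun hc => hx (List.mem_filter.1 hc).1), List.filter_append, hfx]
    · have hp' : p x = false := by simpa using hp
      have hfx : List.filter p [x] = [] := by simp [hp']
      rw [hfx, List.append_nil, ih]
      by_cases hx : x ∈ l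
      · rw [if_pos hx]
      · rw [if_neg hx, List.filter_append, hfx, List.append_nil]


-- ---------- A-side main loop invariant ----------

theorem LA (thrhld : Int) (h0 : 0 ≤ thrhld) :
    ∀ (n : Nat) (s : List Int) (dic : PySem.Dict Int Int), s.length ≤ n →
      dic.keys.Nodup → (∀ k ∈ dic.keys, k ∉ s) →
      (adjA_loop thrhld dic s).items = dic.items ++ roundRec thrhld (PySem.List.dedup s) := by
  intro n
  induction n with
  | zero =>
    intro s dic hn _ _
    have hs : s = [] := by cases s with | nil => rfl | cons a t => simp at hn
    subst hs
    rw [adjA_loop, roundRec]; simp [PySem.List.dedup]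
  | succ n ih =>
    intro s dic hn hnd hdisj
    by_cases hs : s = []
    · subst hs; rw [adjA_loop, roundRec]; simp [PySem.List.dedup]
    have hm : pvM s = (PySem.List.max? s (fun x => x)).getD 0 := rfl
    rw [adjA_loop]
    rw [if_pos (by simpa [List.length_pos_iff] using hs)]
    dsimp only
    rw [← hm]
    -- split the round's pair-state fold into its two components
    have hcong : s.foldl (fun (st : PySem.Dict Int Int × List Int) e =>
          if pvM s - e ≤ thrhld then (st.1.insert e (pvM s), st.2 ++ [e]) else st) (dic, ([] : List Int))
        = s.foldl (fun (st : PySem.Dict Int Int × List Int) e =>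
          ((fun (d : PySem.Dict Int Int) e => if pvM s - e ≤ thrhld then d.insert e (pvM s) else d) st.1 e,
           (fun (l : List Int) e => if pvM s - e ≤ thrhld then l ++ [e] else l) st.2 e)) (dic, ([] : List Int)) :=
      PySem.List.foldl_congr_mem s _ _ _ (by
        intro acc x _
        dsimp only
        split <;> rfl)
    have hsplit : (s.foldl (fun (st : PySem.Dict Int Int × List Int) e =>
          if pvM s - e ≤ thrhld then (st.1.insert e (pvM s), st.2 ++ [e]) else st) (dic, ([] : List Int)))
        = ((s.filter (pvP (pvM s) thrhld)).foldl (fun d e => d.insert e (pvM s)) dic,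
           s.filter (pvP (pvM s) thrhld)) := by
      rw [hcong, PySem.List.foldl_prod_mk
        (fun (d : PySem.Dict Int Int) e => if pvM s - e ≤ thrhld then d.insert e (pvM s) else d)
        (fun (l : List Int) e => if pvM s - e ≤ thrhld then l ++ [e] else l) s dic []]
      rw [PySem.List.foldl_ite_eq_foldl_filter (fun e => pvM s - e ≤ thrhld) (fun d e => d.insert e (pvM s)) s dic]
      rw [PySem.List.foldl_append_ite_eq_filter (fun e => pvM s - e ≤ thrhld) s []]
      rfl
    rw [hsplit]
    dsimp only
    have hrem : (s.filter (pvP (pvM s) thrhld)).foldl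
          (fun acc u => (PySem.List.remove? acc u).getD acc) s = pvRest thrhld s :=
      remove_filter (pvP (pvM s) thrhld) s
    rw [hrem]
    have hlt := rest_lt thrhld s h0 hs
    rw [dif_pos hlt]
    -- the dictionary after the round
    have hdic' : (s.filter (pvP (pvM s) thrhld)).foldl (fun d e => d.insert e (pvM s)) dic
        = ((PySem.List.dedup s).filter (pvP (pvM s) thrhld)).foldl (fun d e => d.insert e (pvM s)) dic := by
      rw [foldl_insert_dedup _ _ _ hnd, dedup_filter]
    set D1 := (PySem.List.dedup s).filter (pvP (pvM s) thrhld) with hD1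
    have hD1mem : ∀ e ∈ D1, e ∈ s ∧ pvP (pvM s) thrhld e = true := by
      intro e he
      rcases List.mem_filter.1 he with ⟨h1, h2⟩
      exact ⟨(PySem.List.mem_dedup s e).1 h1, h2⟩
    have hfresh : ∀ e ∈ D1, dic.contains e = false := fun e he =>
      contains_false_of_not_mem dic e (fun hk => hdisj e hk (hD1mem e he).1)
    have hD1nd : D1.Nodup := (PySem.List.nodup_dedup s).filter _
    have hitems : (D1.foldl (fun d e => d.insert e (pvM s)) dic).items
        = dic.items ++ D1.map (fun e => (e, pvM s)) := by
      have := PySem.Dict.items_foldl_insert_fresh D1 (fun a => a) (fun _ => pvM s) dic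
        (by simpa using hfresh) (by simpa using hD1nd)
      simpa using this
    -- apply the induction hypothesis to the shrunken list
    have hnd' : ((D1.foldl (fun d e => d.insert e (pvM s)) dic)).keys.Nodup := by
      have := PySem.Dict.nodup_keys_foldl_insert D1 (fun _ _ => pvM s) dic hnd
      simpa using this
    have hkeys' : ((D1.foldl (fun d e => d.insert e (pvM s)) dic)).keys
        = PySem.Set.update dic.keys D1 := by
      have := PySem.Dict.keys_foldl_insert D1 (fun _ _ => pvM s) dic
      simpa using this
    have hdisj' : ∀ k ∈ ((D1.foldl (fun d e => d.insert e (pvM s)) dic)).keys,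
        k ∉ pvRest thrhld s := by
      intro k hk hkrest
      rw [hkeys'] at hk
      rcases (mem_update dic.keys D1 k).1 hk with hk | hk
      · exact hdisj k hk ((List.mem_filter.1 hkrest).1)
      · have h1 := (hD1mem k hk).2
        have h2 := (List.mem_filter.1 hkrest).2
        rw [h1] at h2; cases h2
    have hlen' : (pvRest thrhld s).length ≤ n := by
      have : 1 ≤ s.length := by
        cases s with | nil => exact absurd rfl hs | cons a t => simp
      omega
    rw [hdic', ih (pvRest thrhld s) _ hlen' hnd' hdisj', hitems]
    -- fold the round back into roundRec on the dedup'd list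
    have hddne : PySem.List.dedup s ≠ [] := by
      cases s with
      | nil => exact absurd rfl hs
      | cons a t =>
        intro hcon
        have : a ∈ PySem.List.dedup (a :: t) := (PySem.List.mem_dedup _ a).2 (by simp)
        rw [hcon] at this; cases this
    have hMd : pvM (PySem.List.dedup s) = pvM s := by
      apply pvM_eq
      · exact (PySem.List.mem_dedup s _).2 (pvM_mem s hs)
      · intro y hy; exact pvM_isMax s y ((PySem.List.mem_dedup s y).1 hy)
    have hrest : PySem.List.dedup (pvRest thrhld s) = pvRest thrhld (PySem.List.dedup s) := by
      rw [pvRest, dedup_filter, pvRest, hMd]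
    rw [hrest, roundRec_eq thrhld (PySem.List.dedup s) h0 hddne, hMd, List.append_assoc]

-- ---------- B-side: the greedy sweep ----------

def sw (thrhld : Int) (st : PySem.Dict Int Int × Option Int) (v : Int) : PySem.Dict Int Int × Option Int :=
  let cur : Int := match st.2 with
    | none => v
    | some c => if c - v > thrhld then v else c
  (st.1.insert v cur, some cur)

def altB (s : List Int) (thrhld : Int) : List (Int × Int) :=
  let D := PySem.List.dedup s
  let G := ((PySem.List.sorted D (fun v => v) true).foldl (sw thrhld) (PySem.Dict.empty, none)).1
  let B := D.foldl (fun (b : PySem.Dict Int (List Int)) e =>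
      b.modify (G.getD e 0) [] (fun l => l ++ [e])) PySem.Dict.empty
  ((PySem.List.sorted B.keys (fun g => g) true).foldl
      (fun (dic : PySem.Dict Int Int) g =>
        (B.getD g []).foldl (fun dic e => dic.insert e g) dic) PySem.Dict.empty).items

theorem alt_eq (s : List Int) (thrhld : Int) : adjust_coeff_dic_alt s thrhld = altB s thrhld := rfl

def swCur (thrhld : Int) (c : Option Int) (v : Int) : Int :=
  match c with
  | none => v
  | some c => if c - v > thrhld then v else c

theorem sw_eq (thrhld : Int) (e : PySem.Dict Int Int) (c : Option Int) (v : Int) :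
    sw thrhld (e, c) v = (e.insert v (swCur thrhld c v), some (swCur thrhld c v)) := by
  rcases c with _ | c <;> rfl

theorem sweep_const (thrhld m : Int) : ∀ (P : List Int) (d : PySem.Dict Int Int),
    (∀ x ∈ P, m - x ≤ thrhld) →
    P.foldl (sw thrhld) (d, some m) = (P.foldl (fun d e => d.insert e m) d, some m) := by
  intro P
  induction P with
  | nil => intro d _; rfl
  | cons x t ih =>
    intro d h
    simp only [List.foldl_cons]
    have hx : ¬ (m - x > thrhld) := by have := h x (by simp); omega
    rw [sw_eq, show swCur thrhld (some m) x = m from by simp [swCur, if_neg hx],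
      ih _ (fun y hy => h y (by simp [hy]))]

theorem sweep_reset (thrhld : Int) (t : List Int) (d : PySem.Dict Int Int) (w c : Int)
    (h : c - w > thrhld) :
    (w :: t).foldl (sw thrhld) (d, some c) = (w :: t).foldl (sw thrhld) (d, none) := by
  simp only [List.foldl_cons, sw_eq]
  rw [show swCur thrhld (some c) w = w from by simp [swCur, if_pos h],
    show swCur thrhld none w = w from rfl]

theorem sweep_get?_notmem (thrhld : Int) : ∀ (S : List Int) (d : PySem.Dict Int Int)
    (c : Option Int) (k : Int), k ∉ S →
    ((S.foldl (sw thrhld) (d, c)).1).get? k = d.get? k := by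
  intro S
  induction S with
  | nil => intro d c k _; rfl
  | cons v t ih =>
    intro d c k hk
    have hkv : k ≠ v := fun h => hk (by simp [h])
    have hkt : k ∉ t := fun h => hk (by simp [h])
    simp only [List.foldl_cons, sw_eq]
    rw [ih _ _ _ hkt, PySem.Dict.get?_insert_of_ne _ _ hkv]

theorem sweep_dict_irrel (thrhld : Int) : ∀ (S : List Int) (d d' : PySem.Dict Int Int)
    (c : Option Int) (k : Int), k ∈ S →
    ((S.foldl (sw thrhld) (d, c)).1).get? k = ((S.foldl (sw thrhld) (d', c)).1).get? k := by
  intro S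
  induction S with
  | nil => intro d d' c k hk; cases hk
  | cons v t ih =>
    intro d d' c k hk
    simp only [List.foldl_cons, sw_eq]
    by_cases hkt : k ∈ t
    · exact ih _ _ _ _ hkt
    · have hkv : k = v := by
        rcases List.mem_cons.1 hk with h | h
        · exact h
        · exact absurd h hkt
      subst hkv
      rw [sweep_get?_notmem thrhld t _ _ k hkt, sweep_get?_notmem thrhld t _ _ k hkt,
        PySem.Dict.get?_insert_self, PySem.Dict.get?_insert_self]

-- ---------- B-side: descending sort splits into rounds ----------

def pvHere (thrhld : Int) (d : List Int) : List Int := d.filter (pvP (pvM d) thrhld)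

theorem mem_pvHere_iff (thrhld : Int) (d : List Int) (e : Int) :
    e ∈ pvHere thrhld d ↔ e ∈ d ∧ pvP (pvM d) thrhld e = true := by
  simp [pvHere, List.mem_filter]

theorem sorted_desc_strict (l : List Int) (hl : l.Nodup) :
    (PySem.List.sorted l (fun v : Int => v) true).Pairwise (fun a b => b < a) := by
  have h1 := PySem.List.sorted_pairwise_rev l (fun v : Int => v)
  have h2 : (PySem.List.sorted l (fun v : Int => v) true).Nodup :=
    ((PySem.List.sorted_perm l (fun v : Int => v) true).nodup_iff).2 hl
  exact (h1.and h2).imp (fun h => lt_of_le_of_ne h.1 (fun he => h.2 he.symm))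

theorem sorted_split (thrhld : Int) (d : List Int) (hn : d.Nodup) :
    PySem.List.sorted d (fun v => v) true
      = PySem.List.sorted (pvHere thrhld d) (fun v => v) true
        ++ PySem.List.sorted (pvRest thrhld d) (fun v => v) true := by
  apply PySem.List.sorted_rev_eq_of_perm_of_pairwise_gt
  · exact ((PySem.List.sorted_perm (pvHere thrhld d) (fun v : Int => v) true).append
      (PySem.List.sorted_perm (pvRest thrhld d) (fun v : Int => v) true)).trans
      (List.filter_append_perm (pvP (pvM d) thrhld) d)
  · refine List.pairwise_append.2 ⟨sorted_desc_strict _ (hn.filter _), sorted_desc_strict _ (hn.filter _), ?_⟩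
    intro a ha b hb
    have ha' : a ∈ pvHere thrhld d :=
      ((PySem.List.sorted_perm (pvHere thrhld d) (fun v : Int => v) true).mem_iff).1 ha
    have hb' : b ∈ pvRest thrhld d :=
      ((PySem.List.sorted_perm (pvRest thrhld d) (fun v : Int => v) true).mem_iff).1 hb
    have h1 := ((mem_pvHere_iff thrhld d a).1 ha').2
    have h2 := ((mem_pvRest_iff thrhld d b).1 hb').2
    simp [pvP] at h1 h2
    omega

-- characterisation of the sweep dictionary: each value maps to its round max
theorem GC (thrhld : Int) (h0 : 0 ≤ thrhld) :
    ∀ (n : Nat) (d : List Int), d.length ≤ n → d.Nodup → ∀ v ∈ d,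
      (((PySem.List.sorted d (fun x => x) true).foldl (sw thrhld) (PySem.Dict.empty, none)).1).get? v
        = some (rho thrhld d v) := by
  intro n
  induction n with
  | zero =>
    intro d hn _ v hv
    cases d with
    | nil => cases hv
    | cons a t => simp at hn
  | succ n ih =>
    intro d hn hnd v hv
    have hd : d ≠ [] := by rintro rfl; cases hv
    rw [sorted_split thrhld d hnd, List.foldl_append]
    have hmD1 : pvM d ∈ pvHere thrhld d :=
      (mem_pvHere_iff thrhld d _).2 ⟨pvM_mem d hd, by simp [pvP]; omega⟩
    have hS1ne : PySem.List.sorted (pvHere thrhld d) (fun v => v) true ≠ [] := by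
      rw [Ne, PySem.List.sorted_eq_nil_iff]; rintro h; rw [h] at hmD1; cases hmD1
    obtain ⟨w, t1, hS1⟩ : ∃ w t1, PySem.List.sorted (pvHere thrhld d) (fun v => v) true = w :: t1 := by
      cases hc : PySem.List.sorted (pvHere thrhld d) (fun v => v) true with
      | nil => exact absurd hc hS1ne
      | cons w t1 => exact ⟨w, t1, rfl⟩
    have hwm : w = pvM d := by
      have hwmem : w ∈ pvHere thrhld d :=
        ((PySem.List.sorted_perm (pvHere thrhld d) (fun v : Int => v) true).mem_iff).1 (by rw [hS1]; simp)
      have hle : w ≤ pvM d := pvM_isMax d w ((mem_pvHere_iff thrhld d w).1 hwmem).1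
      have hge : pvM d ≤ w := PySem.List.key_head_sorted_rev_ge (pvHere thrhld d) (fun v => v) hS1 (pvM d) hmD1
      omega
    subst hwm
    have hS1mem : ∀ x ∈ t1, pvM d - x ≤ thrhld := by
      intro x hx
      have hx1 : x ∈ pvHere thrhld d :=
        ((PySem.List.sorted_perm (pvHere thrhld d) (fun v : Int => v) true).mem_iff).1 (by rw [hS1]; simp [hx])
      have := ((mem_pvHere_iff thrhld d x).1 hx1).2
      simp [pvP] at this; omega
    have hfold1 : (PySem.List.sorted (pvHere thrhld d) (fun v => v) true).foldl (sw thrhld) (PySem.Dict.empty, none)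
        = ((pvM d :: t1).foldl (fun (d' : PySem.Dict Int Int) e => d'.insert e (pvM d)) PySem.Dict.empty, some (pvM d)) := by
      rw [hS1]
      simp only [List.foldl_cons, sw_eq]
      rw [show swCur thrhld none (pvM d) = pvM d from rfl]
      exact sweep_const thrhld (pvM d) t1 _ hS1mem
    rw [hfold1]
    have hG1 : ∀ u, u ∈ pvHere thrhld d →
        ((pvM d :: t1).foldl (fun (d' : PySem.Dict Int Int) e => d'.insert e (pvM d)) PySem.Dict.empty).get? u
          = some (pvM d) := by
      intro u hu
      rw [get?_foldl_insert_const]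
      have : u ∈ pvM d :: t1 := by
        rw [← hS1]
        exact ((PySem.List.sorted_perm (pvHere thrhld d) (fun v : Int => v) true).mem_iff).2 hu
      simp [this]
    have hmemS2 : ∀ x, x ∈ PySem.List.sorted (pvRest thrhld d) (fun v => v) true ↔ x ∈ pvRest thrhld d :=
      fun x => (PySem.List.sorted_perm (pvRest thrhld d) (fun v : Int => v) true).mem_iff
    by_cases hp : pvP (pvM d) thrhld v = true
    · -- v belongs to this round: untouched by the rest of the sweep
      have hvnot : v ∉ PySem.List.sorted (pvRest thrhld d) (fun v => v) true := by
        rw [hmemS2]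
        intro hvm
        have := ((mem_pvRest_iff thrhld d v).1 hvm).2
        rw [hp] at this; cases this
      cases hS2 : PySem.List.sorted (pvRest thrhld d) (fun v => v) true with
      | nil =>
        simp only [List.foldl_nil]
        rw [hG1 v ((mem_pvHere_iff thrhld d v).2 ⟨hv, hp⟩), rho_here thrhld d v hd hp]
      | cons w2 t2 =>
        rw [← hS2]
        rw [show ((PySem.List.sorted (pvRest thrhld d) (fun v => v) true).foldl (sw thrhld)
            ((pvM d :: t1).foldl (fun (d' : PySem.Dict Int Int) e => d'.insert e (pvM d)) PySem.Dict.empty, some (pvM d))).1.get? v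
          = ((pvM d :: t1).foldl (fun (d' : PySem.Dict Int Int) e => d'.insert e (pvM d)) PySem.Dict.empty).get? v
          from sweep_get?_notmem thrhld _ _ _ v hvnot]
        rw [hG1 v ((mem_pvHere_iff thrhld d v).2 ⟨hv, hp⟩), rho_here thrhld d v hd hp]
    · -- v belongs to a later round
      have hp' : pvP (pvM d) thrhld v = false := by simpa using hp
      have hvD2 : v ∈ pvRest thrhld d := (mem_pvRest_iff thrhld d v).2 ⟨hv, hp'⟩
      have hvS2 : v ∈ PySem.List.sorted (pvRest thrhld d) (fun v => v) true := (hmemS2 v).2 hvD2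
      cases hS2 : PySem.List.sorted (pvRest thrhld d) (fun v => v) true with
      | nil => rw [hS2] at hvS2; cases hvS2
      | cons w2 t2 =>
        have hw2 : w2 ∈ pvRest thrhld d := (hmemS2 w2).1 (by rw [hS2]; simp)
        have hw2p := ((mem_pvRest_iff thrhld d w2).1 hw2).2
        have hw2gap : pvM d - w2 > thrhld := by simp [pvP] at hw2p; omega
        rw [sweep_reset thrhld t2 _ w2 (pvM d) hw2gap, ← hS2]
        rw [sweep_dict_irrel thrhld (PySem.List.sorted (pvRest thrhld d) (fun v => v) true)
          _ PySem.Dict.empty none v hvS2]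
        have hlt := rest_lt thrhld d h0 hd
        rw [ih (pvRest thrhld d) (by omega) (hnd.filter _) v hvD2]
        rw [rho_rest thrhld d v h0 hd hp']

-- ---------- B-side: the final emission loop ----------

theorem FF : ∀ (gs : List Int) (bk : Int → List Int) (d : PySem.Dict Int Int), d.keys.Nodup →
    (∀ g ∈ gs, ∀ e ∈ bk g, d.contains e = false) →
    (∀ g ∈ gs, (bk g).Nodup) →
    gs.Pairwise (fun g g' => ∀ e ∈ bk g, e ∉ bk g') →
    (gs.foldl (fun dc g => (bk g).foldl (fun dc e => dc.insert e g) dc) d).items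
      = d.items ++ gs.flatMap (fun g => (bk g).map (fun e => (e, g))) := by
  intro gs
  induction gs with
  | nil => intro bk d _ _ _ _; simp
  | cons g t ih =>
    intro bk d hnd hfresh hbnd hpw
    simp only [List.foldl_cons, List.flatMap_cons]
    have hitems : ((bk g).foldl (fun dc e => dc.insert e g) d).items
        = d.items ++ (bk g).map (fun e => (e, g)) := by
      have := PySem.Dict.items_foldl_insert_fresh (bk g) (fun a => a) (fun _ => g) d
        (by simpa using hfresh g (by simp)) (by simpa using hbnd g (by simp))
      simpa using this
    have hnd' : ((bk g).foldl (fun dc e => dc.insert e g) d).keys.Nodup := by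
      have := PySem.Dict.nodup_keys_foldl_insert (bk g) (fun _ _ => g) d hnd
      simpa using this
    have hkeys' : ((bk g).foldl (fun dc e => dc.insert e g) d).keys = PySem.Set.update d.keys (bk g) := by
      have := PySem.Dict.keys_foldl_insert (bk g) (fun _ _ => g) d
      simpa using this
    rcases List.pairwise_cons.1 hpw with ⟨hg, hpw'⟩
    have hfresh' : ∀ g' ∈ t, ∀ e ∈ bk g',
        ((bk g).foldl (fun dc e => dc.insert e g) d).contains e = false := by
      intro g' hg' e he
      apply contains_false_of_not_mem
      rw [hkeys']
      intro hmem
      rcases (mem_update d.keys (bk g) e).1 hmem with h | h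
      · have hc := (PySem.Dict.contains_iff_mem_keys d e).2 h
        rw [hfresh g' (by simp [hg']) e he] at hc
        cases hc
      · exact hg g' hg' e h he
    rw [ih bk _ hnd' hfresh' (fun g' hg' => hbnd g' (by simp [hg'])) hpw', hitems, List.append_assoc]

theorem rmaxes_eq (thrhld : Int) (d : List Int) (h0 : 0 ≤ thrhld) (hd : d ≠ []) :
    rmaxes thrhld d = pvM d :: rmaxes thrhld (pvRest thrhld d) := by
  rw [rmaxes]; simp [hd, dif_pos (rest_lt thrhld d h0 hd)]

theorem flatMap_congr_mem {α β : Type} (l : List α) (f f' : α → List β)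
    (h : ∀ a ∈ l, f a = f' a) : l.flatMap f = l.flatMap f' := by
  induction l with
  | nil => rfl
  | cons a t ih =>
    simp only [List.flatMap_cons]
    rw [h a (by simp), ih (fun a ha => h a (by simp [ha]))]

theorem roundRec_flat (thrhld : Int) (h0 : 0 ≤ thrhld) :
    ∀ (n : Nat) (d : List Int), d.length ≤ n →
      roundRec thrhld d
        = (rmaxes thrhld d).flatMap
            (fun g => (d.filter (fun e => rho thrhld d e == g)).map (fun e => (e, g))) := by
  intro n
  induction n with
  | zero =>
    intro d hn
    cases d with
    | nil => rw [roundRec, rmaxes]; simp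
    | cons a t => simp at hn
  | succ n ih =>
    intro d hn
    by_cases hd : d = []
    · subst hd; rw [roundRec, rmaxes]; simp
    have hlt := rest_lt thrhld d h0 hd
    rw [roundRec_eq thrhld d h0 hd, rmaxes_eq thrhld d h0 hd, List.flatMap_cons]
    have hbig : ∀ e, e ∈ pvRest thrhld d → rho thrhld (pvRest thrhld d) e < pvM d := by
      intro e he
      have hrmem : rho thrhld (pvRest thrhld d) e ∈ pvRest thrhld d :=
        rho_mem thrhld h0 (pvRest thrhld d).length _ e le_rfl he
      have := ((mem_pvRest_iff thrhld d _).1 hrmem).2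
      simp [pvP] at this; omega
    congr 1
    · -- this round's bucket
      have hfe : d.filter (pvP (pvM d) thrhld) = d.filter (fun e => rho thrhld d e == pvM d) := by
        apply List.filter_congr
        intro e he
        by_cases hp : pvP (pvM d) thrhld e = true
        · rw [hp, rho_here thrhld d e hd hp]; simp
        · have hp' : pvP (pvM d) thrhld e = false := by simpa using hp
          rw [hp', rho_rest thrhld d e h0 hd hp']
          have := hbig e ((mem_pvRest_iff thrhld d e).2 ⟨he, hp'⟩)
          symm; simp; omega
      rw [hfe]
    · -- later rounds' buckets
      rw [ih (pvRest thrhld d) (by omega)]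
      apply flatMap_congr_mem
      intro g hgmem
      have hglt : g < pvM d := rmaxes_rest_lt thrhld h0 d hd g hgmem
      have hfe : d.filter (fun e => rho thrhld d e == g)
          = d.filter (fun e => (rho thrhld (pvRest thrhld d) e == g) && !pvP (pvM d) thrhld e) := by
        apply List.filter_congr
        intro e he
        by_cases hp : pvP (pvM d) thrhld e = true
        · rw [hp, rho_here thrhld d e hd hp]
          simp; omega
        · have hp' : pvP (pvM d) thrhld e = false := by simpa using hp
          rw [hp', rho_rest thrhld d e h0 hd hp']
          simp
      rw [hfe, ← List.filter_filter]
      rfl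

-- ---------- B-side assembly ----------

theorem LB (s : List Int) (thrhld : Int) (h0 : 0 ≤ thrhld) :
    adjust_coeff_dic_alt s thrhld = roundRec thrhld (PySem.List.dedup s) := by
  have hDnd : (PySem.List.dedup s).Nodup := PySem.List.nodup_dedup s
  set D := PySem.List.dedup s with hDdef
  set G := ((PySem.List.sorted D (fun v => v) true).foldl (sw thrhld) (PySem.Dict.empty, none)).1 with hGdef
  have hGget : ∀ e ∈ D, G.getD e 0 = rho thrhld D e := by
    intro e he
    rw [hGdef, PySem.Dict.getD_eq_get?_getD, GC thrhld h0 D.length D le_rfl hDnd e he]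
    rfl
  rw [alt_eq]
  show ((PySem.List.sorted (D.foldl (fun (b : PySem.Dict Int (List Int)) e =>
      b.modify (G.getD e 0) [] (fun l => l ++ [e])) PySem.Dict.empty).keys (fun g => g) true).foldl
      (fun (dic : PySem.Dict Int Int) g => ((D.foldl (fun (b : PySem.Dict Int (List Int)) e =>
      b.modify (G.getD e 0) [] (fun l => l ++ [e])) PySem.Dict.empty).getD g []).foldl
      (fun dic e => dic.insert e g) dic) PySem.Dict.empty).items = roundRec thrhld D
  have hBstep : D.foldl (fun (b : PySem.Dict Int (List Int)) e =>
        b.modify (G.getD e 0) [] (fun l => l ++ [e])) PySem.Dict.empty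
      = D.foldl (fun (b : PySem.Dict Int (List Int)) e =>
        b.modify (rho thrhld D e) [] (fun l => l ++ [e])) PySem.Dict.empty := by
    apply PySem.List.foldl_congr_mem
    intro acc x hx
    rw [hGget x hx]
  rw [hBstep]
  set B := D.foldl (fun (b : PySem.Dict Int (List Int)) e =>
      b.modify (rho thrhld D e) [] (fun l => l ++ [e])) PySem.Dict.empty with hBdef
  have hpair : (D.map (fun e => (rho thrhld D e, e))).foldl
      (fun (b : PySem.Dict Int (List Int)) p => b.modify p.1 [] (fun l => l ++ [p.2])) PySem.Dict.empty = B := by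
    rw [List.foldl_map]
  have hBgetD : ∀ c, B.getD c [] = D.filter (fun e => rho thrhld D e == c) := by
    intro c
    rw [← hpair, PySem.Dict.getD_foldl_modify_append]
    rw [List.filter_map]
    simp [Function.comp_def]
  have hBkeys : B.keys = PySem.List.dedup (D.map (fun e => rho thrhld D e)) := by
    have := PySem.Dict.keys_foldl_modify_key D (fun e => rho thrhld D e) []
      (fun _ e => fun l => l ++ [e]) PySem.Dict.empty
    rw [hBdef]
    simpa [PySem.Set.update, PySem.List.dedup_eq_ofList, PySem.Set.ofList_eq_foldl] using this
  have hgt := rmaxes_gt thrhld h0 D.length D le_rfl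
  have hGS : PySem.List.sorted B.keys (fun g => g) true = rmaxes thrhld D := by
    apply PySem.List.sorted_rev_eq_of_perm_of_pairwise_gt
    · refine (List.perm_ext_iff_of_nodup ?_ ?_).2 ?_
      · exact hgt.imp (fun h => ne_of_gt h)
      · rw [hBkeys]; exact PySem.List.nodup_dedup _
      · intro g
        rw [hBkeys, mem_rmaxes thrhld h0 D.length D le_rfl g, PySem.List.mem_dedup, List.mem_map]
    · exact hgt
  rw [hGS]
  have hstep2 : (rmaxes thrhld D).foldl (fun (dic : PySem.Dict Int Int) g =>
        (B.getD g []).foldl (fun dic e => dic.insert e g) dic) PySem.Dict.empty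
      = (rmaxes thrhld D).foldl (fun (dic : PySem.Dict Int Int) g =>
        ((D.filter (fun e => rho thrhld D e == g)).foldl (fun dic e => dic.insert e g) dic)) PySem.Dict.empty := by
    apply PySem.List.foldl_congr_mem
    intro acc g _
    rw [hBgetD g]
  rw [hstep2]
  rw [FF (rmaxes thrhld D) (fun g => D.filter (fun e => rho thrhld D e == g)) PySem.Dict.empty
    (by simp) (fun g _ e _ => by simp) (fun g _ => hDnd.filter _)
    (hgt.imp (fun hggt e he1 he2 => by
      have h1 := (List.mem_filter.1 he1).2
      have h2 := (List.mem_filter.1 he2).2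
      simp at h1 h2
      omega))]
  rw [roundRec_flat thrhld h0 D.length D le_rfl]
  simp only [show (PySem.Dict.empty : PySem.Dict Int Int).items = ([] : List (Int × Int)) from rfl,
    List.nil_append]

-- ---------- the equivalence ----------

theorem adjust_coeff_dic_main : ∀ (s : List Int) (thrhld : Int), Pre_adjust_coeff_dic s thrhld →
    adjust_coeff_dic s thrhld = adjust_coeff_dic_alt s thrhld := by
  intro s thrhld hpre
  by_cases h0 : 0 ≤ thrhld
  · have hLA := LA thrhld h0 s.length s PySem.Dict.empty le_rfl (by simp) (by simp)
    calc adjust_coeff_dic s thrhld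
        = (adjA_loop thrhld PySem.Dict.empty s).items := rfl
      _ = PySem.Dict.empty.items ++ roundRec thrhld (PySem.List.dedup s) := hLA
      _ = roundRec thrhld (PySem.List.dedup s) := by
            simp only [show (PySem.Dict.empty : PySem.Dict Int Int).items = ([] : List (Int × Int)) from rfl,
              List.nil_append]
      _ = adjust_coeff_dic_alt s thrhld := (LB s thrhld h0).symm
  · have hs : s = [] := by
      rcases hpre with h | h
      · exact h
      · exact absurd h h0
    subst hs
    have h1 : adjA_loop thrhld PySem.Dict.empty [] = PySem.Dict.empty := by
      rw [adjA_loop]; simp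
    show (adjA_loop thrhld PySem.Dict.empty []).items = adjust_coeff_dic_alt [] thrhld
    rw [h1]
    rfl

-- ===== VERDICT (by name: the statement is the Claim_ definition above) =====
theorem adjust_coeff_dic_spec : Claim_equal_adjust_coeff_dic := by
  intro s thrhld _ hpre
  exact adjust_coeff_dic_main s thrhld hpre
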